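-- pv_equiv track=rewrite | github.com/JayMirasol/LeetCode-Coding_Practices- | 3. MaxScore from Removing Stone.py | Solution
-- ===== SOURCE A (Python) =====
-- def Solution(a: int, b: int, c: int) -> int:
--     l = sorted([a,b,c])
--     l = [x for x in l if x > 0]
--     res = 0
--     while len(l) > 1:
--         l[0] -= 1
--         l[-1] -= 1
--         res += 1
--         l = sorted([x for x in l if x > 0])
--     return res
-- ===== SOURCE B (Python) =====
-- def Solution(a: int, b: int, c: int) -> int:
--     x, y, z = max(a, 0), max(b, 0), max(c, 0)
--     s = x + y + z
--     return min(s // 2, s - max(x, y, z))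
-- ===== Notes on version B (the rewrite author's own statement) =====
-- stated objective: faster
-- what changed: Replaced A's one-move-per-iteration simulation loop (re-sorting the piles each step) by the closed-form answer min(total//2, total - largest pile) on the non-negative-clamped piles.
import Mathlib
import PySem

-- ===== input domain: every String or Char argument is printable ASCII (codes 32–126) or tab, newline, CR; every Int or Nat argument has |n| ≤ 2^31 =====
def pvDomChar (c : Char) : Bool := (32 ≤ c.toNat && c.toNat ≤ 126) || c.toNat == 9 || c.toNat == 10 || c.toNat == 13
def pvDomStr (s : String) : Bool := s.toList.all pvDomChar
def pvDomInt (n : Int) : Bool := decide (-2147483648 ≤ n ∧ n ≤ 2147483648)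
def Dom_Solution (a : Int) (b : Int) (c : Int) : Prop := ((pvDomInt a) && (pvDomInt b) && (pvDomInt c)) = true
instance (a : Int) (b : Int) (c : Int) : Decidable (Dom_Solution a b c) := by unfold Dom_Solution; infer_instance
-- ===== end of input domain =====

-- B replaces A's one-step-at-a-time simulation loop by the closed form min(total//2, total - largest pile); return value proved equal.

-- ===== PORT A =====
-- while len(l) > 1: l[0] -= 1; l[-1] -= 1; res += 1; l = sorted([x for x in l if x > 0])
-- (fuel only makes the recursion total; the guard `1 < l.length` is the Python loop guard)
def SolutionLoop : Nat → List Int → Int → Int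
  | 0, _, res => res
  | fuel+1, l, res =>
    if 1 < l.length then
      let l1 := l.set 0 (PySem.List.pyGetD l 0 0 - 1)
      let l2 := l1.set (l1.length - 1) (PySem.List.pyGetD l1 (-1) 0 - 1)
      SolutionLoop fuel
        (PySem.List.sorted (l2.filter (fun x => decide (x > 0))) (fun x => x) false)
        (res + 1)
    else res

def Solution (a : Int) (b : Int) (c : Int) : Int :=
  let l := PySem.List.sorted [a, b, c] (fun x => x) false
  let l := l.filter (fun x => decide (x > 0))
  SolutionLoop (a.toNat + b.toNat + c.toNat + 1) l 0

-- ===== PORT B =====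
def Solution_alt (a : Int) (b : Int) (c : Int) : Int :=
  let x := max a 0
  let y := max b 0
  let z := max c 0
  let s := x + y + z
  min (PySem.Int.floordiv s 2) (s - max x (max y z))

-- ===== PRECONDITION & SPEC =====
def Spec_Solution (a : Int) (b : Int) (c : Int) (out : Int) : Prop := out = Solution_alt a b c
instance (a : Int) (b : Int) (c : Int) (out : Int) : Decidable (Spec_Solution a b c out) := by unfold Spec_Solution; infer_instance

-- ===== CLAIM (what is proved, stated in full; the proofs are below) =====
def Claim_equal_Solution : Prop := ∀ (a : Int) (b : Int) (c : Int), Dom_Solution a b c → Spec_Solution a b c (Solution a b c)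

-- ===== LEMMAS AND PROOFS =====

-- closed form of the loop body on a sorted, all-positive list of ≤ 3 elements
def clo : List Int → Int
  | [x, _] => x
  | [x, y, z] => min (PySem.Int.floordiv (x + y + z) 2) (x + y)
  | _ => 0

theorem SolutionLoop_clo : ∀ (fuel : Nat) (l : List Int) (res : Int),
    l.Pairwise (· ≤ ·) → (∀ x ∈ l, 0 < x) → l.length ≤ 3 → l.sum.toNat ≤ fuel →
    SolutionLoop fuel l res = res + clo l := by
  intro fuel
  induction fuel with
  | zero =>
    intro l res hp hpos hlen hsum
    match l with
    | [] => simp [SolutionLoop, clo]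
    | [x] => simp [SolutionLoop, clo]
    | [x, y] =>
      have hx := hpos x (by simp)
      have hy := hpos y (by simp)
      simp [List.sum_cons] at hsum; omega
    | [x, y, z] =>
      have hx := hpos x (by simp)
      have hy := hpos y (by simp)
      have hz := hpos z (by simp)
      simp [List.sum_cons] at hsum; omega
  | succ fuel ih =>
    intro l res hp hpos hlen hsum
    match l with
    | [] => simp [SolutionLoop, clo]
    | [x] => simp [SolutionLoop, clo]
    | [x, y] =>
      have hxy : x ≤ y := by simp [List.pairwise_cons] at hp; exact hp
      have hx : (0:Int) < x := hpos x (by simp)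
      have hy : (0:Int) < y := hpos y (by simp)
      have step : SolutionLoop (fuel+1) [x, y] res
          = SolutionLoop fuel
              (PySem.List.sorted (List.filter (fun t => decide (t > 0)) [x-1, y-1]) (fun t => t) false)
              (res + 1) := rfl
      rw [step]
      simp [List.sum_cons] at hsum
      by_cases hx1 : (1:Int) < x
      · have hf : List.filter (fun t => decide (t > 0)) [x-1, y-1] = [x-1, y-1] := by
          simp [List.filter, hx1, show (1:Int) < y by omega]
        have hsorted : PySem.List.sorted [x-1, y-1] (fun t => t) false = [x-1, y-1] :=
          PySem.List.sorted_eq_self_of_pairwise _ _ (by simp [List.pairwise_cons]; omega)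
        rw [hf, hsorted, ih _ _ (by simp [List.pairwise_cons]; omega)
          (by intro t ht; simp at ht; rcases ht with h | h <;> omega)
          (by simp) (by simp [List.sum_cons]; omega)]
        simp only [clo]; omega
      · have hx' : x = 1 := by omega
        subst hx'
        by_cases hy1 : (1:Int) < y
        · have hf : List.filter (fun t => decide (t > 0)) [1-1, y-1] = [y-1] := by
            simp [List.filter, hy1]
          have hsorted : PySem.List.sorted [y-1] (fun t => t) false = [y-1] :=
            PySem.List.sorted_eq_self_of_pairwise _ _ (by simp)
          rw [hf, hsorted, ih _ _ (by simp) (by intro t ht; simp at ht; omega)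
            (by simp) (by simp [List.sum_cons]; omega)]
          simp only [clo]; omega
        · have hy' : y = 1 := by omega
          subst hy'
          have hf : List.filter (fun t => decide (t > 0)) [(1:Int)-1, 1-1] = [] := by
            simp [List.filter]
          have hsorted : PySem.List.sorted ([] : List Int) (fun t => t) false = [] := rfl
          rw [hf, hsorted, ih _ _ (by simp) (by simp) (by simp) (by simp)]
          simp only [clo]; omega
    | [x, y, z] =>
      have hxy : x ≤ y := by simp [List.pairwise_cons] at hp; omega
      have hyz : y ≤ z := by simp [List.pairwise_cons] at hp; omega
      have hx : (0:Int) < x := hpos x (by simp)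
      have hy : (0:Int) < y := hpos y (by simp)
      have hz : (0:Int) < z := hpos z (by simp)
      have step : SolutionLoop (fuel+1) [x, y, z] res
          = SolutionLoop fuel
              (PySem.List.sorted (List.filter (fun t => decide (t > 0)) [x-1, y, z-1]) (fun t => t) false)
              (res + 1) := rfl
      rw [step]
      simp [List.sum_cons] at hsum
      by_cases hx1 : (1:Int) < x
      · have hf : List.filter (fun t => decide (t > 0)) [x-1, y, z-1] = [x-1, y, z-1] := by
          simp [List.filter, hx1, hy, show (1:Int) < z by omega]
        rw [hf]
        by_cases hyz1 : y ≤ z - 1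
        · have hsorted : PySem.List.sorted [x-1, y, z-1] (fun t => t) false = [x-1, y, z-1] :=
            PySem.List.sorted_eq_self_of_pairwise _ _ (by simp [List.pairwise_cons]; omega)
          rw [hsorted, ih _ _ (by simp [List.pairwise_cons]; omega)
            (by intro t ht; simp at ht; rcases ht with h | h | h <;> omega)
            (by simp) (by simp [List.sum_cons]; omega)]
          simp only [clo]
          rw [PySem.Int.floordiv_eq_ediv_of_pos (by norm_num),
              PySem.Int.floordiv_eq_ediv_of_pos (by norm_num)]
          omega
        · have hperm : ([x-1, z-1, y] : List Int).Perm [x-1, y, z-1] :=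
            List.Perm.cons _ (List.Perm.swap _ _ _)
          have hsorted : PySem.List.sorted [x-1, y, z-1] (fun t => t) false = [x-1, z-1, y] :=
            PySem.List.sorted_id_eq_of_perm_of_pairwise _ _ hperm (by simp [List.pairwise_cons]; omega)
          rw [hsorted, ih _ _ (by simp [List.pairwise_cons]; omega)
            (by intro t ht; simp at ht; rcases ht with h | h | h <;> omega)
            (by simp) (by simp [List.sum_cons]; omega)]
          simp only [clo]
          rw [PySem.Int.floordiv_eq_ediv_of_pos (by norm_num),
              PySem.Int.floordiv_eq_ediv_of_pos (by norm_num)]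
          omega
      · have hx' : x = 1 := by omega
        subst hx'
        by_cases hz1 : (1:Int) < z
        · have hf : List.filter (fun t => decide (t > 0)) [(1:Int)-1, y, z-1] = [y, z-1] := by
            simp [List.filter, hy, hz1]
          rw [hf]
          by_cases hyz1 : y ≤ z - 1
          · have hsorted : PySem.List.sorted [y, z-1] (fun t => t) false = [y, z-1] :=
              PySem.List.sorted_eq_self_of_pairwise _ _ (by simp [List.pairwise_cons]; omega)
            rw [hsorted, ih _ _ (by simp [List.pairwise_cons]; omega)
              (by intro t ht; simp at ht; rcases ht with h | h <;> omega)
              (by simp) (by simp [List.sum_cons]; omega)]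
            simp only [clo]
            rw [PySem.Int.floordiv_eq_ediv_of_pos (by norm_num)]
            omega
          · have hperm : ([z-1, y] : List Int).Perm [y, z-1] := List.Perm.swap _ _ _
            have hsorted : PySem.List.sorted [y, z-1] (fun t => t) false = [z-1, y] :=
              PySem.List.sorted_id_eq_of_perm_of_pairwise _ _ hperm (by simp [List.pairwise_cons]; omega)
            rw [hsorted, ih _ _ (by simp [List.pairwise_cons]; omega)
              (by intro t ht; simp at ht; rcases ht with h | h <;> omega)
              (by simp) (by simp [List.sum_cons]; omega)]
            simp only [clo]
            rw [PySem.Int.floordiv_eq_ediv_of_pos (by norm_num)]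
            omega
        · have hz' : z = 1 := by omega
          have hy' : y = 1 := by omega
          subst hz'; subst hy'
          have hf : List.filter (fun t => decide (t > 0)) [(1:Int)-1, 1, 1-1] = [1] := by
            simp [List.filter]
          have hsorted : PySem.List.sorted [(1:Int)] (fun t => t) false = [1] :=
            PySem.List.sorted_eq_self_of_pairwise _ _ (by simp)
          rw [hf, hsorted, ih _ _ (by simp) (by simp) (by simp) (by simp; omega)]
          simp only [clo]
          rw [PySem.Int.floordiv_eq_ediv_of_pos (by norm_num)]
          omega

theorem core_sorted (x y z : Int) (hxy : x ≤ y) (hyz : y ≤ z) (fuel : Nat)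
    (hf : (max x 0 + max y 0 + max z 0).toNat ≤ fuel) :
    SolutionLoop fuel (List.filter (fun t => decide (t > 0)) [x, y, z]) 0
      = min (PySem.Int.floordiv (max x 0 + max y 0 + max z 0) 2)
            (max x 0 + max y 0 + max z 0 - max (max x 0) (max (max y 0) (max z 0))) := by
  rw [PySem.Int.floordiv_eq_ediv_of_pos (by norm_num)]
  by_cases hx : (0:Int) < x
  · have hfilt : List.filter (fun t => decide (t > 0)) [x, y, z] = [x, y, z] := by
      simp [List.filter, hx, show (0:Int) < y by omega, show (0:Int) < z by omega]
    rw [hfilt, SolutionLoop_clo fuel _ 0 (by simp [List.pairwise_cons]; omega)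
      (by intro t ht; simp at ht; rcases ht with h | h | h <;> omega)
      (by simp) (by simp [List.sum_cons]; omega)]
    simp only [clo]
    rw [PySem.Int.floordiv_eq_ediv_of_pos (by norm_num)]
    omega
  · by_cases hy : (0:Int) < y
    · have hfilt : List.filter (fun t => decide (t > 0)) [x, y, z] = [y, z] := by
        simp [List.filter, hx, hy, show (0:Int) < z by omega]
      rw [hfilt, SolutionLoop_clo fuel _ 0 (by simp [List.pairwise_cons]; omega)
        (by intro t ht; simp at ht; rcases ht with h | h <;> omega)
        (by simp) (by simp [List.sum_cons]; omega)]
      simp only [clo]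
      omega
    · by_cases hz : (0:Int) < z
      · have hfilt : List.filter (fun t => decide (t > 0)) [x, y, z] = [z] := by
          simp [List.filter, hx, hy, hz]
        rw [hfilt, SolutionLoop_clo fuel _ 0 (by simp) (by intro t ht; simp at ht; omega)
          (by simp) (by simp [List.sum_cons]; omega)]
        simp only [clo]
        omega
      · have hfilt : List.filter (fun t => decide (t > 0)) [x, y, z] = [] := by
          simp [List.filter, hx, hy, hz]
        rw [hfilt, SolutionLoop_clo fuel _ 0 (by simp) (by simp) (by simp) (by simp)]
        simp only [clo]
        omega

theorem finish_sorted (a b c x y z : Int) (hxy : x ≤ y) (hyz : y ≤ z)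
    (hcl : max x 0 + max y 0 + max z 0 = max a 0 + max b 0 + max c 0)
    (hmx : max (max x 0) (max (max y 0) (max z 0)) = max (max a 0) (max (max b 0) (max c 0)))
    (hfuel : (max x 0 + max y 0 + max z 0).toNat ≤ a.toNat + b.toNat + c.toNat + 1) :
    SolutionLoop (a.toNat + b.toNat + c.toNat + 1)
        (List.filter (fun t => decide (t > 0)) [x, y, z]) 0
      = min (PySem.Int.floordiv (max a 0 + max b 0 + max c 0) 2)
            (max a 0 + max b 0 + max c 0 - max (max a 0) (max (max b 0) (max c 0))) := by
  rw [core_sorted x y z hxy hyz _ hfuel, hcl, hmx]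

-- ===== VERDICT (by name: the statement is the Claim_ definition above) =====
theorem Solution_spec : Claim_equal_Solution := by
  intro a b c _hdom
  unfold Spec_Solution
  simp only [Solution, Solution_alt]
  rcases le_total a b with hab | hab <;> rcases le_total b c with hbc | hbc <;>
    rcases le_total a c with hac | hac
  · rw [PySem.List.sorted_id_eq_of_perm_of_pairwise _ _ (List.Perm.refl [a,b,c])
        (by simp [List.pairwise_cons]; omega)]
    exact finish_sorted a b c a b c hab hbc (by omega) (by omega) (by omega)
  · rw [PySem.List.sorted_id_eq_of_perm_of_pairwise _ _ (List.Perm.refl [a,b,c])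
        (by simp [List.pairwise_cons]; omega)]
    exact finish_sorted a b c a b c hab hbc (by omega) (by omega) (by omega)
  · rw [PySem.List.sorted_id_eq_of_perm_of_pairwise _ _
        (show ([a,c,b] : List Int).Perm [a,b,c] from List.Perm.cons _ (List.Perm.swap _ _ _))
        (by simp [List.pairwise_cons]; omega)]
    exact finish_sorted a b c a c b hac hbc (by omega) (by omega) (by omega)
  · rw [PySem.List.sorted_id_eq_of_perm_of_pairwise _ _
        (show ([c,a,b] : List Int).Perm [a,b,c] from
          (List.Perm.swap a c [b]).trans (List.Perm.cons _ (List.Perm.swap _ _ _)))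
        (by simp [List.pairwise_cons]; omega)]
    exact finish_sorted a b c c a b hac hab (by omega) (by omega) (by omega)
  · rw [PySem.List.sorted_id_eq_of_perm_of_pairwise _ _
        (show ([b,a,c] : List Int).Perm [a,b,c] from List.Perm.swap _ _ _)
        (by simp [List.pairwise_cons]; omega)]
    exact finish_sorted a b c b a c hab hac (by omega) (by omega) (by omega)
  · rw [PySem.List.sorted_id_eq_of_perm_of_pairwise _ _
        (show ([b,c,a] : List Int).Perm [a,b,c] from
          (List.Perm.cons _ (List.Perm.swap _ _ _)).trans (List.Perm.swap _ _ _))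
        (by simp [List.pairwise_cons]; omega)]
    exact finish_sorted a b c b c a hbc hac (by omega) (by omega) (by omega)
  · -- b ≤ a, c ≤ b, a ≤ c : all equal
    rw [PySem.List.sorted_id_eq_of_perm_of_pairwise _ _ (List.Perm.refl [a,b,c])
        (by simp [List.pairwise_cons]; omega)]
    exact finish_sorted a b c a b c (by omega) (by omega) (by omega) (by omega) (by omega)
  · rw [PySem.List.sorted_id_eq_of_perm_of_pairwise _ _
        (show ([c,b,a] : List Int).Perm [a,b,c] from
          (List.Perm.swap _ _ _).trans ((List.Perm.cons _ (List.Perm.swap _ _ _)).trans (List.Perm.swap _ _ _)))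
        (by simp [List.pairwise_cons]; omega)]
    exact finish_sorted a b c c b a hbc hab (by omega) (by omega) (by omega)
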